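-- pv_equiv track=rewrite | github.com/Liphip/EidI | ha5/aufgabe_1.py | maximiere
-- ===== SOURCE A (Python) =====
-- def maximiere(s: str, k: int) -> str:
--     def vertausche(s: str, i: int, j: int) -> str:
--         return s[0:i] + s[j] + s[i + 1:j] + s[i] + s[j + 1:len(s)]
--
--     def sortiere(s: str) -> str:
--         return "".join((sorted(s)[::-1]))
--
--     if k == 1:
--         return vertausche(s, k - 1, s.rindex(sortiere(s)[k - 1]))
--     else:
--         x = maximiere(s, k - 1)
--         return vertausche(x, k - 1, x.rindex(sortiere(x)[k - 1]))
-- ===== SOURCE B (Python) =====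
-- def maximiere(s: str, k: int) -> str:
--     for i in range(k):
--         j = s.rindex(max(s[i:]))
--         s = s[:i] + s[j] + s[i + 1:j] + s[i] + s[j + 1:]
--     return s
-- ===== Notes on version B (the rewrite author's own statement) =====
-- stated objective: faster
-- what changed: Replaced the recursion on k that re-sorts the whole string at every step ('"".join(sorted(x)[::-1])') with one iterative loop that never sorts: since the first i positions are already maximal, the next character is simply max(s[i:]).
import Mathlib
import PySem

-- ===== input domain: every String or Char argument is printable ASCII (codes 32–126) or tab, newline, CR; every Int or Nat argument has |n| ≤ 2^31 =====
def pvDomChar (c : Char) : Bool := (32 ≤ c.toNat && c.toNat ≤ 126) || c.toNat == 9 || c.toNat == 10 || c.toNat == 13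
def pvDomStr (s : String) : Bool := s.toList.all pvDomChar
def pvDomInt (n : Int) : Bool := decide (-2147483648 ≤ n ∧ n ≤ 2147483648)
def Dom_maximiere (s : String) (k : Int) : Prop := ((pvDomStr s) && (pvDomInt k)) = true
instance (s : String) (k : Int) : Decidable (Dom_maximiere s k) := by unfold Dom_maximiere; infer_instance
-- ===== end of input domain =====

-- B replaces A's recursion on k, which re-sorts the whole string at every step, with one
-- iterative loop that never sorts: the next character is simply max(s[i:]) (objective: faster).

-- ===== PORT A =====
-- s.rindex(c): index of the LAST occurrence, none = ValueError (hand port; exact).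
-- Both Pythons call .rindex, so both ports share this helper.
def pvRindex (cs : List Char) (c : Char) : Option Nat :=
  match cs with
  | [] => none
  | a :: rest =>
    match pvRindex rest c with
    | some j => some (j + 1)
    | none => if a = c then some 0 else none

-- vertausche: s[0:i] + s[j] + s[i+1:j] + s[i] + s[j+1:len(s)]; the single-char lookups are s[j], s[i]
-- (IndexError = none, mapped to [] — under Pre_ the indices are always in range)
def pvVert (x : List Char) (i j : Int) : List Char :=
  PySem.List.slice x (some 0) (some i)
    ++ ((PySem.List.pyGet? x j).elim [] (fun c => [c]))
    ++ PySem.List.slice x (some (i + 1)) (some j)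
    ++ ((PySem.List.pyGet? x i).elim [] (fun c => [c]))
    ++ PySem.List.slice x (some (j + 1)) (some (x.length : Int))

-- sortiere: "".join(sorted(s)[::-1]) on the char-list side ([::-1] is reverse,
-- PySem.List.slice?_none_none_neg_one; "".join over single chars is String.ofList at the boundary)
def pvSortiere (x : List Char) : List Char :=
  (PySem.List.sorted x (fun c => c) false).reverse

-- one unfolded level of A: vertausche(x, k-1, x.rindex(sortiere(x)[k-1])) with km1 = k-1
-- (the none branches are Python's IndexError/ValueError, unreachable under Pre_)
def pvStepA (x : List Char) (km1 : Int) : List Char :=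
  match PySem.List.pyGet? (pvSortiere x) km1 with
  | none => x
  | some c =>
    match pvRindex x c with
    | none => x
    | some j => pvVert x km1 (j : Int)

-- the recursion on k: 'if k == 1: step(s,0) else step(maximiere(s,k-1), k-1)', fuelled by k.toNat
-- (n = 0 is Python's unbounded recursion for k ≤ 0, excluded by Pre_)
def pvGoA (s : List Char) : Nat → List Char
  | 0 => s
  | n + 1 => if n = 0 then pvStepA s 0 else pvStepA (pvGoA s n) (n : Int)

def maximiere (s : String) (k : Int) : String :=
  String.ofList (pvGoA s.toList k.toNat)

-- ===== PORT B =====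
-- loop body of Source B: j = s.rindex(max(s[i:])); s = s[:i] + s[j] + s[i+1:j] + s[i] + s[j+1:]
-- (max('') = ValueError and rindex-miss = ValueError are the none branches, unreachable under Pre_)
def pvStepB (x : List Char) (i : Int) : List Char :=
  match PySem.List.max? (PySem.List.slice x (some i) none) (fun c => c) with
  | none => x
  | some c =>
    match pvRindex x c with
    | none => x
    | some j =>
      PySem.List.slice x none (some i)
        ++ ((PySem.List.pyGet? x (j : Int)).elim [] (fun a => [a]))
        ++ PySem.List.slice x (some (i + 1)) (some (j : Int))
        ++ ((PySem.List.pyGet? x i).elim [] (fun a => [a]))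
        ++ PySem.List.slice x (some ((j : Int) + 1)) none

def maximiere_alt (s : String) (k : Int) : String :=
  String.ofList ((PySem.List.pyRange 0 k 1).foldl pvStepB s.toList)

-- ===== PRECONDITION & SPEC =====
-- A recurses without bound (RecursionError) for k ≤ 0 and raises IndexError on the empty
-- string; on every other input A returns (each step keeps the running index below the length),
-- so Pre_ excludes exactly the raising inputs.
def Pre_maximiere (s : String) (k : Int) : Prop :=
  1 ≤ k ∧ s ≠ ""
instance (s : String) (k : Int) : Decidable (Pre_maximiere s k) := by
  unfold Pre_maximiere; infer_instance

def pvWitness_maximiere : String × Int := ("ba", 1)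

def Spec_maximiere (s : String) (k : Int) (out : String) : Prop := out = maximiere_alt s k
instance (s : String) (k : Int) (out : String) : Decidable (Spec_maximiere s k out) := by
  unfold Spec_maximiere; infer_instance

-- ===== CLAIM (what is proved, stated in full; the proofs are below) =====
def Claim_equal_maximiere : Prop :=
  ∀ (s : String) (k : Int), Dom_maximiere s k → Pre_maximiere s k →
    Spec_maximiere s k (maximiere s k)

-- ===== LEMMAS AND PROOFS =====

-- abbreviation used only in the proofs: the descending sort
def pvSd (x : List Char) : List Char := PySem.List.sorted x (fun c => c) true

-- any rearrangement of x that is pairwise descending IS sorted(x, reverse=True)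
theorem pvSd_eq_of_perm_of_pairwise (x z : List Char) (hp : z.Perm x)
    (hd : z.Pairwise (fun a b => b ≤ a)) : pvSd x = z := by
  have h1 : (pvSd x).reverse.Perm z.reverse :=
    ((PySem.List.sorted_perm x (fun c => c) true).trans hp.symm) |> (List.reverse_perm _).trans |>.trans (List.reverse_perm _).symm
  have h2 := PySem.List.eq_of_perm_of_pairwise_le_of_injective (l₁ := (pvSd x).reverse)
    (l₂ := z.reverse) (fun c : Char => c) (fun a b h => h) h1
    (List.pairwise_reverse.mpr (PySem.List.sorted_pairwise_rev x (fun c => c)))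
    (List.pairwise_reverse.mpr hd)
  simpa using congrArg List.reverse h2

theorem pvSd_pairwise (x : List Char) : (pvSd x).Pairwise (fun a b => b ≤ a) :=
  PySem.List.sorted_pairwise_rev x (fun c => c)

theorem pvSd_perm (x : List Char) : (pvSd x).Perm x :=
  PySem.List.sorted_perm x (fun c => c) true

theorem pvSd_length (x : List Char) : (pvSd x).length = x.length :=
  (pvSd_perm x).length_eq

-- A's sortiere is the descending sort
theorem pvSortiere_eq_sd (x : List Char) : pvSortiere x = pvSd x := by
  unfold pvSortiere
  refine (pvSd_eq_of_perm_of_pairwise x _ ?_ ?_).symm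
  · exact (List.reverse_perm _).trans (PySem.List.sorted_perm x _ false)
  · exact List.pairwise_reverse.mpr (by simpa using PySem.List.sorted_pairwise x (fun c => c))

-- rindex: none iff absent
theorem pvRindex_eq_none_iff (x : List Char) (c : Char) :
    pvRindex x c = none ↔ c ∉ x := by
  induction x with
  | nil => simp [pvRindex]
  | cons a rest ih =>
    simp only [pvRindex, List.mem_cons]
    cases h : pvRindex rest c with
    | some j => simp [h] at ih ⊢; exact fun _ => ih
    | none =>
      simp [h] at ih ⊢
      constructor
      · intro hne; exact ⟨fun he => hne he.symm, ih⟩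
      · intro ⟨h1, _⟩ he; exact h1 he.symm

-- rindex is the last occurrence
theorem pvRindex_spec (x : List Char) (c : Char) (j : Nat) (h : pvRindex x c = some j) :
    ∃ hj : j < x.length, x[j] = c ∧ ∀ l (hl : l < x.length), j < l → x[l] ≠ c := by
  induction x generalizing j with
  | nil => simp [pvRindex] at h
  | cons a rest ih =>
    simp only [pvRindex] at h
    cases hr : pvRindex rest c with
    | some j' =>
      rw [hr] at h
      obtain rfl : j' + 1 = j := by simpa using h
      obtain ⟨hj', hc, hlast⟩ := ih j' hr
      refine ⟨by simpa using Nat.succ_lt_succ hj', by simpa using hc, ?_⟩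
      intro l hl hgt
      match l, hl, hgt with
      | l + 1, hl, hgt =>
        simpa using hlast l (by simpa using hl) (by omega)
    | none =>
      rw [hr] at h
      have hnm : c ∉ rest := (pvRindex_eq_none_iff rest c).mp hr
      by_cases he : a = c
      · simp only [he] at h; simp at h
        obtain rfl : 0 = j := by simpa using h
        refine ⟨by simp, by simpa using he, ?_⟩
        intro l hl hgt
        match l, hl with
        | l + 1, hl =>
          intro hcl
          exact hnm (by simpa using hcl ▸ List.getElem_mem (l := rest) (by simpa using hl))
      · simp [he] at h

-- last occurrence of sd[m] is not before m, when the m-prefix of x is the m-prefix of pvSd x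
theorem pv_last_ge (x : List Char) (m j : Nat) (c : Char)
    (hpre : x.take m = (pvSd x).take m) (hm : m < x.length)
    (hc : (pvSd x)[m]? = some c)
    (hr : pvRindex x c = some j) : m ≤ j := by
  by_contra hlt
  have hlt' : j < m := Nat.lt_of_not_le (fun h => hlt h)
  obtain ⟨hj, hxj, hlast⟩ := pvRindex_spec x c j hr
  have hmt : m < (pvSd x).length := by rw [pvSd_length]; exact hm
  have hdrop : c ∉ x.drop m := by
    intro hmem
    obtain ⟨p, hp, hpe⟩ := List.getElem_of_mem hmem
    rw [List.getElem_drop] at hpe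
    exact hlast (m + p) (by simp at hp; omega) (by omega) hpe
  have h1 : x.count c = (x.take m).count c := by
    conv_lhs => rw [← List.take_append_drop m x]
    rw [List.count_append, List.count_eq_zero.mpr hdrop]
    simp
  have h2 : ((pvSd x).take (m + 1)).count c = ((pvSd x).take m).count c + 1 := by
    rw [List.take_add_one, hc]
    simp
  have h3 : ((pvSd x).take (m + 1)).count c ≤ (pvSd x).count c :=
    (List.take_sublist _ _).count_le c
  have h4 : (pvSd x).count c = x.count c := (pvSd_perm x).count_eq c
  have h5 : (x.take m).count c = ((pvSd x).take m).count c := by rw [hpre]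
  omega

-- the suffixes are permutations of each other while the prefixes agree
theorem pv_drop_perm (x : List Char) (m : Nat) (hpre : x.take m = (pvSd x).take m) :
    (x.drop m).Perm ((pvSd x).drop m) := by
  have hp : (x.take m ++ x.drop m).Perm ((pvSd x).take m ++ (pvSd x).drop m) := by
    rw [List.take_append_drop, List.take_append_drop]
    exact (pvSd_perm x).symm
  rw [hpre] at hp
  exact (List.perm_append_left_iff _).mp hp

-- B's choice max(x[m:]) is A's choice sortiere(x)[m]
theorem pv_max_eq_sd (x : List Char) (m : Nat) (c : Char)
    (hpre : x.take m = (pvSd x).take m) (hm : m < x.length)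
    (hc : (pvSd x)[m]? = some c) :
    PySem.List.max? (x.drop m) (fun a => a) = some c := by
  have hmt : m < (pvSd x).length := by rw [pvSd_length]; exact hm
  have hcm : (pvSd x)[m]'hmt = c := by
    rw [List.getElem?_eq_getElem hmt] at hc; exact Option.some.inj hc
  have hne : x.drop m ≠ [] := by
    intro h
    have := congrArg List.length h
    simp at this
    omega
  obtain ⟨v, hv⟩ : ∃ v, PySem.List.max? (x.drop m) (fun a => a) = some v := by
    cases hmm : PySem.List.max? (x.drop m) (fun a => a) with
    | none => exact absurd ((PySem.List.max?_eq_none_iff _ _).mp hmm) hne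
    | some v => exact ⟨v, rfl⟩
  have hperm := pv_drop_perm x m hpre
  have hcd : c ∈ (pvSd x).drop m := by
    rw [List.drop_eq_getElem_cons hmt, hcm]
    exact List.mem_cons_self
  have hcx : c ∈ x.drop m := hperm.symm.subset hcd
  have hvmem : v ∈ x.drop m := PySem.List.max?_mem hv
  have h1 : c ≤ v := PySem.List.max?_isMax hv c hcx
  have h2 : v ≤ c := by
    have hvd : v ∈ (pvSd x).drop m := hperm.subset hvmem
    obtain ⟨p, hp, hpe⟩ := List.getElem_of_mem hvd
    rw [List.getElem_drop] at hpe
    have hplen : m + p < (pvSd x).length := by simp at hp; omega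
    rcases Nat.eq_zero_or_pos p with rfl | hpos
    · exact le_of_eq (by rw [← hpe, ← hcm]; simp)
    · have hpw := List.pairwise_iff_getElem.mp (pvSd_pairwise x) m (m + p) hmt hplen (by omega)
      rw [hpe, hcm] at hpw
      exact hpw
  rw [hv, le_antisymm h2 h1]

-- vertausche for m ≤ j < len, as one explicit decomposition
theorem pvVert_eq (x : List Char) (m j : Nat) (hmj : m ≤ j) (hj : j < x.length) :
    pvVert x (m : Int) (j : Int) =
      x.take m ++ x[j] :: ((x.drop (m+1)).take (j - (m+1)) ++ x[m]'(Nat.lt_of_le_of_lt hmj hj) :: x.drop (j+1)) := by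
  unfold pvVert
  have h1 : PySem.List.slice x (some (0 : Int)) (some (m : Int)) = x.take m := by
    rw [PySem.List.slice_zero_start, PySem.List.slice_to_natCast]
  have h2 : PySem.List.pyGet? x (j : Int) = some (x[j]) := by
    rw [PySem.List.pyGet?_natCast]; exact List.getElem?_eq_getElem hj
  have h3 : PySem.List.slice x (some ((m : Int) + 1)) (some (j : Int)) =
      (x.drop (m+1)).take (j - (m+1)) := by
    rw [show ((m : Int) + 1) = ((m + 1 : Nat) : Int) by push_cast; ring, PySem.List.slice_natCast]
  have h4 : PySem.List.pyGet? x (m : Int) = some (x[m]'(Nat.lt_of_le_of_lt hmj hj)) := by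
    rw [PySem.List.pyGet?_natCast]; exact List.getElem?_eq_getElem _
  have h5 : PySem.List.slice x (some ((j : Int) + 1)) (some (x.length : Int)) = x.drop (j+1) := by
    rw [show ((j : Int) + 1) = ((j + 1 : Nat) : Int) by push_cast; ring, PySem.List.slice_natCast]
    exact List.take_of_length_le (by simp)
  rw [h1, h2, h3, h4, h5]
  simp

-- B's slice expression is A's vertausche (B writes s[:i] and s[j+1:], A s[0:i] and s[j+1:len(s)])
theorem pvSwapB_eq_vert (x : List Char) (m j : Nat) :
    PySem.List.slice x none (some (m : Int))
      ++ ((PySem.List.pyGet? x (j : Int)).elim [] (fun a => [a]))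
      ++ PySem.List.slice x (some ((m : Int) + 1)) (some (j : Int))
      ++ ((PySem.List.pyGet? x (m : Int)).elim [] (fun a => [a]))
      ++ PySem.List.slice x (some ((j : Int) + 1)) none = pvVert x (m : Int) (j : Int) := by
  unfold pvVert
  rw [PySem.List.slice_zero_start]
  congr 1
  rw [show ((j : Int) + 1) = ((j + 1 : Nat) : Int) by push_cast; ring,
    PySem.List.slice_from_natCast, PySem.List.slice_natCast]
  exact (List.take_of_length_le (by simp)).symm

-- the i == j case of vertausche duplicates x[m]
theorem pvVert_dup (x : List Char) (m : Nat) (hm : m < x.length) :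
    pvVert x (m : Int) (m : Int) = x.take m ++ x[m] :: x.drop m := by
  rw [pvVert_eq x m m le_rfl hm]
  rw [show m - (m+1) = 0 from by omega, List.take_zero]
  rw [List.drop_eq_getElem_cons hm]
  simp

-- swapping two elements across a middle segment is a permutation
theorem pv_swap_perm (pre mid tail : List Char) (u v : Char) :
    (pre ++ u :: (mid ++ v :: tail)).Perm (pre ++ v :: (mid ++ u :: tail)) := by
  apply List.Perm.append_left
  exact (List.Perm.cons u List.perm_middle).trans
    ((List.Perm.swap v u (mid ++ tail)).trans (List.Perm.cons v List.perm_middle.symm))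

-- x split at positions m < j < len
theorem pv_split (x : List Char) (m j : Nat) (hmj : m < j) (hj : j < x.length) :
    x = x.take m ++ x[m]'(Nat.lt_trans hmj hj) ::
      ((x.drop (m+1)).take (j - (m+1)) ++ x[j] :: x.drop (j+1)) := by
  conv_lhs => rw [← List.take_append_drop m x, List.drop_eq_getElem_cons (Nat.lt_trans hmj hj)]
  congr 2
  conv_lhs => rw [← List.take_append_drop (j - (m+1)) (x.drop (m+1))]
  rw [List.drop_drop, show m + 1 + (j - (m+1)) = j from by omega, List.drop_eq_getElem_cons hj]

-- prefix of an append by one more element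
theorem pv_take_succ_append (pre rest : List Char) (m : Nat) (hpl : pre.length = m)
    (u : Char) : (pre ++ u :: rest).take (m + 1) = pre ++ [u] := by
  rw [List.take_append, hpl, List.take_of_length_le (by omega)]
  simp

-- per-step: B's step equals A's step, the sorted prefix grows by one, the length never shrinks
theorem pvStep_agree (x : List Char) (m : Nat)
    (hpre : x.take m = (pvSd x).take m) (hm : m < x.length) :
    pvStepB x (m : Int) = pvStepA x (m : Int) ∧
      (pvStepA x (m : Int)).take (m + 1) = (pvSd (pvStepA x (m : Int))).take (m + 1) ∧
      m + 1 < (pvStepA x (m : Int)).length := by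
  have hmt : m < (pvSd x).length := by rw [pvSd_length]; exact hm
  obtain ⟨c, hc⟩ : ∃ c, (pvSd x)[m]? = some c :=
    ⟨(pvSd x)[m]'hmt, List.getElem?_eq_getElem hmt⟩
  have hA : PySem.List.pyGet? (pvSortiere x) (m : Int) = some c := by
    rw [pvSortiere_eq_sd, PySem.List.pyGet?_natCast, hc]
  have hB : PySem.List.max? (PySem.List.slice x (some (m : Int)) none) (fun a => a) = some c := by
    rw [PySem.List.slice_from_natCast]
    exact pv_max_eq_sd x m c hpre hm hc
  have hcx : c ∈ x := (pvSd_perm x).subset (List.mem_of_getElem? hc)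
  obtain ⟨j, hrx⟩ : ∃ j, pvRindex x c = some j := by
    cases hr : pvRindex x c with
    | none => exact absurd ((pvRindex_eq_none_iff x c).mp hr) (by simpa using hcx)
    | some j => exact ⟨j, rfl⟩
  obtain ⟨hjlt, hxj, hlast⟩ := pvRindex_spec x c j hrx
  have hmle : m ≤ j := pv_last_ge x m j c hpre hm hc hrx
  have hAstep : pvStepA x (m : Int) = pvVert x (m : Int) (j : Int) := by
    unfold pvStepA
    rw [hA]
    simp only [hrx]
  have hBstep : pvStepB x (m : Int) = pvVert x (m : Int) (j : Int) := by
    unfold pvStepB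
    rw [hB]
    simp only [hrx]
    exact pvSwapB_eq_vert x m j
  refine ⟨hBstep.trans hAstep.symm, ?_⟩
  have hcm : (pvSd x)[m]'hmt = c := by
    rw [List.getElem?_eq_getElem hmt] at hc
    exact Option.some.inj hc
  by_cases hcase : m < j
  · -- proper swap: a permutation of x, same length
    have hperm : (pvStepA x (m : Int)).Perm x := by
      rw [hAstep, pvVert_eq x m j (Nat.le_of_lt hcase) hjlt]
      conv_rhs => rw [pv_split x m j hcase hjlt]
      exact pv_swap_perm _ _ _ _ _
    have hsd : pvSd (pvStepA x (m : Int)) = pvSd x :=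
      pvSd_eq_of_perm_of_pairwise _ _ ((pvSd_perm x).trans hperm.symm) (pvSd_pairwise x)
    have htake : (pvStepA x (m : Int)).take (m + 1) = (pvSd x).take (m + 1) := by
      have e1 := pv_take_succ_append (x.take m)
        ((x.drop (m+1)).take (j - (m+1)) ++ x[m]'hm :: x.drop (j + 1))
        m (by rw [List.length_take]; omega) (x[j])
      rw [hAstep, pvVert_eq x m j (Nat.le_of_lt hcase) hjlt, e1, hxj,
        List.take_add_one, hc, hpre]
      simp
    refine ⟨by rw [htake, hsd], by rw [hperm.length_eq]; omega⟩
  · -- the maximal character is already in place: the slice step duplicates it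
    have hjm : j = m := by omega
    subst hjm
    have hxm : x[j]'hm = c := hxj
    have hAval : pvStepA x (j : Int) = x.take j ++ c :: x.drop j := by
      rw [hAstep, pvVert_dup x j hm, hxm]
    have htdrop : (pvSd x).drop j = c :: (pvSd x).drop (j + 1) := by
      rw [List.drop_eq_getElem_cons hmt, hcm]
    obtain ⟨P1, P2, X⟩ := List.pairwise_append.mp
      (by rw [List.take_append_drop]; exact pvSd_pairwise x :
        List.Pairwise (fun a b : Char => b ≤ a) ((pvSd x).take j ++ (pvSd x).drop j))
    have hzp : ((pvSd x).take j ++ c :: (pvSd x).drop j).Pairwise (fun a b => b ≤ a) := by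
      refine List.pairwise_append.mpr ⟨P1, ?_, ?_⟩
      · refine List.pairwise_cons.mpr ⟨?_, P2⟩
        intro b hb
        rw [htdrop] at hb
        rcases List.mem_cons.mp hb with rfl | hb
        · exact le_refl _
        · rw [htdrop] at P2
          exact (List.pairwise_cons.mp P2).1 b hb
      · intro a ha b hb
        rcases List.mem_cons.mp hb with rfl | hb
        · exact X a ha b (by rw [htdrop]; exact List.mem_cons_self)
        · exact X a ha b hb
    have hperm : ((pvSd x).take j ++ c :: (pvSd x).drop j).Perm
        (x.take j ++ c :: x.drop j) := by
      refine List.perm_middle.trans (List.Perm.trans ?_ List.perm_middle.symm)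
      rw [List.take_append_drop, List.take_append_drop]
      exact List.Perm.cons c (pvSd_perm x)
    have hsd : pvSd (pvStepA x (j : Int)) = (pvSd x).take j ++ c :: (pvSd x).drop j := by
      rw [hAval]
      exact pvSd_eq_of_perm_of_pairwise _ _ hperm hzp
    refine ⟨?_, ?_⟩
    · have e1 := pv_take_succ_append (x.take j) (x.drop j) j (by rw [List.length_take]; omega) c
      have e2 := pv_take_succ_append ((pvSd x).take j) ((pvSd x).drop j) j
        (by rw [List.length_take, pvSd_length]; omega) c
      rw [hsd, hAval, e1, e2, hpre]
    · rw [hAval]; simp; omega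

-- pvGoA unfolds one step at the top
theorem pvGoA_succ (s : List Char) (m : Nat) :
    pvGoA s (m + 1) = pvStepA (pvGoA s m) (m : Int) := by
  cases m with
  | zero => simp [pvGoA]
  | succ n => simp [pvGoA]

-- the main loop invariant: both processes coincide, the m-prefix is the descending sort's
-- m-prefix, and the running index stays below the (possibly grown) length
theorem pv_main (s : List Char) (m : Nat) (hs : s ≠ []) :
    (PySem.List.pyRange 0 (m : Int) 1).foldl pvStepB s = pvGoA s m ∧
      (pvGoA s m).take m = (pvSd (pvGoA s m)).take m ∧
      m < (pvGoA s m).length := by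
  induction m with
  | zero => exact ⟨rfl, by simp, List.length_pos_iff.mpr hs⟩
  | succ n ih =>
    obtain ⟨ih1, ih2, ih3⟩ := ih
    obtain ⟨hstep, hpre', hlen'⟩ := pvStep_agree (pvGoA s n) n ih2 ih3
    have hrange : PySem.List.pyRange 0 ((n + 1 : Nat) : Int) 1 =
        PySem.List.pyRange 0 (n : Int) 1 ++ [(n : Int)] := by
      rw [show ((n + 1 : Nat) : Int) = (n : Int) + 1 by push_cast; ring]
      exact PySem.List.pyRange_one_succ_right (by positivity)
    rw [hrange, List.foldl_append, ih1]
    simp only [List.foldl_cons, List.foldl_nil]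
    rw [pvGoA_succ]
    exact ⟨hstep, hpre', hlen'⟩

-- ===== VERDICT (by name: the statement is the Claim_ definition above) =====
theorem maximiere_spec : Claim_equal_maximiere := by
  intro s k _ hpre
  obtain ⟨hk1, hk2⟩ := hpre
  unfold Spec_maximiere maximiere maximiere_alt
  have hkk : ((k.toNat : Nat) : Int) = k := Int.toNat_of_nonneg (by omega)
  have hs : s.toList ≠ [] := by
    intro h
    exact hk2 (by simpa using congrArg String.ofList h)
  obtain ⟨h1, _, _⟩ := pv_main s.toList k.toNat hs
  rw [← hkk, h1, Int.toNat_natCast]
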